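-- pv_equiv track=rewrite | github.com/yg-moon/problem-solving | 2-websites/programmers/pccp/mock-1/Q4-운영체제.py | solution
-- ===== SOURCE A (Python) =====
-- import heapq
--
-- def solution(program):
--     answer = [0] * 11
--     heap = []
--     waiting = []
--     cur_time = 0
--
--     for a, b, c in program:
--         heapq.heappush(heap, (b, a, c))
--
--     while heap or waiting:
--         # 다음 작업이 멀리 있을 때
--         if heap and not waiting and cur_time < heap[0][0]:
--             cur_time = heap[0][0]
--
--         # 대기목록에 추가
--         while heap and heap[0][0] <= cur_time:
--             b, a, c = heapq.heappop(heap)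
--             heapq.heappush(waiting, (a, b, c))
--
--         # 목록에서 하나 실행
--         a, b, c = heapq.heappop(waiting)
--         answer[a] += cur_time - b
--         cur_time += c
--
--     answer[0] = cur_time
--     return answer
-- ===== SOURCE B (Python) =====
-- def solution(program):
--     answer = [0] * 11
--     jobs = sorted((b, a, c) for a, b, c in program)
--     i, n = 0, len(jobs)
--     waiting = []
--     cur_time = 0
--     while i < n or waiting:
--         if not waiting and cur_time < jobs[i][0]:
--             cur_time = jobs[i][0]
--         while i < n and jobs[i][0] <= cur_time:
--             b, a, c = jobs[i]
--             waiting.append((a, b, c))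
--             i += 1
--         job = min(waiting)
--         waiting.remove(job)
--         a, b, c = job
--         answer[a] += cur_time - b
--         cur_time += c
--     answer[0] = cur_time
--     return answer
-- ===== Notes on version B (the rewrite author's own statement) =====
-- stated objective: simpler
-- what changed: Replaces both heapq priority queues with a job list sorted once up front plus a plain waiting list that is re-scanned with min()/remove() each step; same tuple tie-breaking, same return value.
import Mathlib
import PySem

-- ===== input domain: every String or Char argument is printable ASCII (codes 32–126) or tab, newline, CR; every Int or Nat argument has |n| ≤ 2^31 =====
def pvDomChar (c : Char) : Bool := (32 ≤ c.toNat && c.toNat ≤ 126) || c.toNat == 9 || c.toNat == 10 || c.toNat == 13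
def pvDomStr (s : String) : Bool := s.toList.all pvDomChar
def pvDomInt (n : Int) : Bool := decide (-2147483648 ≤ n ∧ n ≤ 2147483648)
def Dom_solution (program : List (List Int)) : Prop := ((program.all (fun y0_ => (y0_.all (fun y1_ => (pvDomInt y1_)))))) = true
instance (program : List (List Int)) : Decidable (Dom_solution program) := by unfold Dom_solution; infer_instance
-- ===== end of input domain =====

-- B replaces A's second (waiting) priority heap by a plain list that is re-scanned with min()/remove()
-- each step, and replaces the arrival heap by a list sorted once; same return value, no speed claim.

-- Python tuples of ints compare lexicographically: pvKey embeds an (a,b,c) triple into a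
-- lexicographically ordered type, order-isomorphically (and injectively).
abbrev pvT := Int × Int × Int

def pvKey (t : pvT) : Lex (Int × Lex (Int × Int)) := toLex (t.1, toLex (t.2.1, t.2.2))

-- ===== PORT A =====
-- Model of heapq used by A (A only calls heappush, heappop and reads heap[0]): the heap is kept as a
-- list sorted ascending by the Python tuple order, so heap[0] is heapq's minimum, heappop removes it
-- and heappush inserts.  For a client observing only push / pop-min / peek-min this is exact
-- (elements with equal comparison key are identical triples, so tie order is unobservable).
def pvHPush (h : List pvT) (x : pvT) : List pvT :=
  match h with
  | [] => [x]
  | y :: ys => if pvKey x < pvKey y then x :: y :: ys else y :: pvHPush ys x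

-- A's inner admission loop: 'while heap and heap[0][0] <= cur_time: pop, push to waiting';
-- returns (popped elements in pop order, remaining heap).
def pvAdmit (h : List pvT) (tm : Int) : List pvT × List pvT :=
  match h with
  | [] => ([], [])
  | t :: rest => if t.1 ≤ tm then ((t :: (pvAdmit rest tm).1), (pvAdmit rest tm).2)
                 else ([], t :: rest)

theorem pvHPush_length (h : List pvT) (x : pvT) : (pvHPush h x).length = h.length + 1 := by
  induction h with
  | nil => rfl
  | cons y ys ih => simp only [pvHPush]; split <;> simp [ih]

theorem pvFoldPush_length {β : Type} (l : List β) (f : β → pvT) (w : List pvT) :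
    (l.foldl (fun w t => pvHPush w (f t)) w).length = w.length + l.length := by
  induction l generalizing w with
  | nil => rfl
  | cons t ts ih => simp [List.foldl_cons, ih, pvHPush_length]; omega

-- the time jump at the top of the outer loop ('if heap and not waiting and cur_time < heap[0][0]')
def pvJump (heap waiting : List pvT) (cur : Int) : Int :=
  match heap with
  | [] => cur
  | t :: _ => if waiting = [] ∧ cur < t.1 then t.1 else cur

theorem pvAdmit_length (h : List pvT) (tm : Int) :
    (pvAdmit h tm).1.length + (pvAdmit h tm).2.length = h.length := by
  induction h with
  | nil => rfl
  | cons t rest ih =>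
    have := ih
    simp only [pvAdmit]
    split
    · simp only [List.length_cons]; omega
    · simp

-- A's outer 'while heap or waiting' loop; state (heap, waiting, cur_time, answer),
-- returns (answer, cur_time).  The '[]' branch of the inner match is where Python's
-- heappop(waiting) would raise IndexError; it is unreachable (the jump + admission always
-- leave waiting nonempty), the loop simply stops there.
def pvALoop (heap waiting : List pvT) (cur : Int) (ans : List Int) : List Int × Int :=
  if heap = [] ∧ waiting = [] then (ans, cur)
  else
    let cur1 := pvJump heap waiting cur
    match hw : (pvAdmit heap cur1).1.foldl (fun w t => pvHPush w (t.2.1, t.1, t.2.2)) waiting with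
    | [] => (ans, cur1)
    | t :: wrest =>
        pvALoop (pvAdmit heap cur1).2 wrest (cur1 + t.2.2)
          (PySem.List.pySetD ans t.1 (PySem.List.pyGetD ans t.1 0 + (cur1 - t.2.1)))
  termination_by heap.length + waiting.length
  decreasing_by
    have h1 := pvAdmit_length heap (pvJump heap waiting cur)
    have h2 := pvFoldPush_length (pvAdmit heap (pvJump heap waiting cur)).1 (fun t => (t.2.1, t.1, t.2.2)) waiting
    rw [hw] at h2
    simp only [List.length_cons] at h2
    omega

def solution (program : List (List Int)) : List Int :=
  -- answer = [0] * 11; for a, b, c in program: heappush(heap, (b, a, c))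
  let heap := program.foldl
    (fun h r => pvHPush h (PySem.List.pyGetD r 1 0, PySem.List.pyGetD r 0 0, PySem.List.pyGetD r 2 0)) []
  let p := pvALoop heap [] 0 (List.replicate 11 0)
  PySem.List.pySetD p.1 0 p.2       -- answer[0] = cur_time

-- ===== PORT B =====
-- B's outer loop: jobs is the still-unadmitted suffix of the pre-sorted job list (the index
-- pointer i of Source B), waiting a plain unordered list; each step admits the due prefix, scans
-- waiting for min(waiting) and removes its first occurrence.  min? = none is Python's
-- 'min of empty' / loop-exit case (unreachable for reachable states, as in A).
def pvBLoop (jobs waiting : List pvT) (cur : Int) (ans : List Int) : List Int × Int :=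
  if jobs = [] ∧ waiting = [] then (ans, cur)
  else
    let cur1 := pvJump jobs waiting cur
    let waiting1 := waiting ++ (jobs.takeWhile (fun t => t.1 ≤ cur1)).map (fun t => (t.2.1, t.1, t.2.2))
    match hm : PySem.List.min? waiting1 pvKey with
    | none => (ans, cur1)
    | some t =>
        pvBLoop (jobs.dropWhile (fun t => t.1 ≤ cur1)) ((PySem.List.remove? waiting1 t).getD waiting1)
          (cur1 + t.2.2) (PySem.List.pySetD ans t.1 (PySem.List.pyGetD ans t.1 0 + (cur1 - t.2.1)))
  termination_by jobs.length + waiting.length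
  decreasing_by
    have ht : t ∈ waiting1 := PySem.List.min?_mem hm
    have h2 := PySem.List.remove?_eq_some_erase waiting1 t ht
    have h3 : (waiting1.erase t).length = waiting1.length - 1 := List.length_erase_of_mem ht
    have h4 : 0 < waiting1.length := List.length_pos_of_mem ht
    have h5 : waiting1.length = waiting.length + (jobs.takeWhile (fun t => t.1 ≤ cur1)).length := by
      simp [waiting1]
    have h6 : (jobs.takeWhile (fun t => decide (t.1 ≤ pvJump jobs waiting cur))).length
        + (jobs.dropWhile (fun t => decide (t.1 ≤ pvJump jobs waiting cur))).length = jobs.length := by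
      rw [← List.length_append, List.takeWhile_append_dropWhile]
    have hcur : pvJump jobs waiting cur = cur1 := rfl
    simp only [hcur] at h6 ⊢
    rw [h2]
    simp only [Option.getD_some]
    omega

def solution_alt (program : List (List Int)) : List Int :=
  -- jobs = sorted((b, a, c) for a, b, c in program): sorting the triples by the injective,
  -- order-preserving key pvKey is Python's tuple sort.
  let jobs := PySem.List.sorted
    (program.map (fun r => (PySem.List.pyGetD r 1 0, PySem.List.pyGetD r 0 0, PySem.List.pyGetD r 2 0)))
    pvKey
  let p := pvBLoop jobs [] 0 (List.replicate 11 0)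
  PySem.List.pySetD p.1 0 p.2

-- ===== PRECONDITION & SPEC =====
-- Pre_ excludes exactly the inputs on which the Python A raises: a row of length ≠ 3 (ValueError
-- at 'for a, b, c in program') and a priority outside -11 ≤ a < 11 (IndexError at 'answer[a] += …';
-- a negative a in that range wraps around and is kept inside Pre_).
def Pre_solution (program : List (List Int)) : Prop :=
  ∀ r ∈ program, r.length = 3 ∧ PySem.Raise.InRange 11 (PySem.List.pyGetD r 0 0)
instance (program : List (List Int)) : Decidable (Pre_solution program) := by
  unfold Pre_solution; infer_instance
def pvWitness_solution : List (List Int) := [[1, 0, 5], [2, 0, 2], [1, 9, 1]]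
def Spec_solution (program : List (List Int)) (out : List Int) : Prop := out = solution_alt program
instance (program : List (List Int)) (out : List Int) : Decidable (Spec_solution program out) := by
  unfold Spec_solution; infer_instance

-- ===== CLAIM (what is proved, stated in full; the proofs are below) =====
def Claim_equal_solution : Prop := ∀ (program : List (List Int)), Dom_solution program → Pre_solution program → Spec_solution program (solution program)

-- ===== LEMMAS AND PROOFS =====

-- the tuple order as a relation on triples
def pvR (x y : pvT) : Prop := pvKey x ≤ pvKey y

theorem pvKey_inj {x y : pvT} (h : pvKey x = pvKey y) : x = y := by
  obtain ⟨a, b, c⟩ := x; obtain ⟨d, e, f⟩ := y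
  simp only [pvKey, toLex_inj, Prod.mk.injEq] at h
  exact Prod.ext h.1 (Prod.ext h.2.1 h.2.2)

theorem pvR_antisymm {x y : pvT} (h1 : pvR x y) (h2 : pvR y x) : x = y :=
  pvKey_inj (le_antisymm h1 h2)

theorem pvHPush_perm (h : List pvT) (x : pvT) : (pvHPush h x).Perm (x :: h) := by
  induction h with
  | nil => simp [pvHPush]
  | cons y ys ih =>
    simp only [pvHPush]; split
    · exact List.Perm.refl _
    · exact (ih.cons y).trans (List.Perm.swap x y ys)

theorem pvHPush_sorted {h : List pvT} (hs : h.Pairwise pvR) (x : pvT) :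
    (pvHPush h x).Pairwise pvR := by
  induction h with
  | nil => simp [pvHPush, List.Pairwise.nil]
  | cons y ys ih =>
    obtain ⟨hy, hys⟩ := List.pairwise_cons.mp hs
    simp only [pvHPush]; split
    · rename_i hlt
      refine List.pairwise_cons.mpr ⟨?_, hs⟩
      intro z hz
      rcases List.mem_cons.mp hz with rfl | hz
      · exact le_of_lt hlt
      · exact le_trans (le_of_lt hlt) (hy z hz)
    · rename_i hnlt
      refine List.pairwise_cons.mpr ⟨?_, ih hys⟩
      intro z hz
      rcases List.mem_cons.mp ((pvHPush_perm ys x).mem_iff.mp hz) with rfl | hz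
      · exact le_of_not_gt hnlt
      · exact hy z hz

theorem pvFoldPush_perm {β : Type} (l : List β) (f : β → pvT) (w : List pvT) :
    (l.foldl (fun w t => pvHPush w (f t)) w).Perm (w ++ l.map f) := by
  induction l generalizing w with
  | nil => simp
  | cons t ts ih =>
    simp only [List.foldl_cons, List.map_cons]
    refine (ih (pvHPush w (f t))).trans ?_
    exact ((pvHPush_perm w (f t)).append_right _).trans
      (by simpa using (List.perm_middle (a := f t) (l₁ := w) (l₂ := ts.map f)).symm)

theorem pvFoldPush_sorted {β : Type} {w : List pvT} (hw : w.Pairwise pvR) (l : List β) (f : β → pvT) :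
    (l.foldl (fun w t => pvHPush w (f t)) w).Pairwise pvR := by
  induction l generalizing w with
  | nil => exact hw
  | cons t ts ih => exact ih (pvHPush_sorted hw (f t))

theorem pvAdmit_eq (h : List pvT) (tm : Int) :
    pvAdmit h tm = (h.takeWhile (fun t => t.1 ≤ tm), h.dropWhile (fun t => t.1 ≤ tm)) := by
  induction h with
  | nil => rfl
  | cons t rest ih =>
    simp only [pvAdmit]
    by_cases hle : t.1 ≤ tm
    · simp [hle, ih]
    · simp [hle]

theorem pvLoop_eq : ∀ (n : Nat) (heap waiting wl : List pvT) (cur : Int) (ans : List Int),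
    heap.length + waiting.length = n →
    heap.Pairwise pvR → waiting.Pairwise pvR → waiting.Perm wl →
    pvALoop heap waiting cur ans = pvBLoop heap wl cur ans := by
  intro n
  induction n using Nat.strong_induction_on with
  | _ n ih =>
  intro heap waiting wl cur ans hn hsh hsw hp
  have hwiff : waiting = [] ↔ wl = [] := by
    constructor <;> intro h <;> subst h
    · exact hp.symm.eq_nil
    · exact hp.eq_nil
  rw [pvALoop.eq_def, pvBLoop.eq_def]
  by_cases hE : heap = [] ∧ waiting = []
  · have hwl : wl = [] := hwiff.mp hE.2
    simp [hE.1, hE.2, hwl]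
  · have hE' : ¬(heap = [] ∧ wl = []) := fun h => hE ⟨h.1, hwiff.mpr h.2⟩
    rw [if_neg hE, if_neg hE']
    have hjump : pvJump heap wl cur = pvJump heap waiting cur := by
      unfold pvJump
      cases heap with
      | nil => rfl
      | cons t ts =>
        by_cases hw0 : waiting = []
        · simp [hw0, hwiff.mp hw0]
        · have hwl : ¬ wl = [] := fun h => hw0 (hwiff.mpr h)
          simp [hw0, hwl]
    have hWperm : ((pvAdmit heap (pvJump heap waiting cur)).1.foldl
          (fun w t => pvHPush w (t.2.1, t.1, t.2.2)) waiting).Perm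
        (wl ++ (heap.takeWhile (fun t => decide (t.1 ≤ pvJump heap waiting cur))).map
          (fun t => (t.2.1, t.1, t.2.2))) := by
      rw [pvAdmit_eq]
      exact (pvFoldPush_perm _ _ waiting).trans (hp.append_right _)
    have hWsorted : ((pvAdmit heap (pvJump heap waiting cur)).1.foldl
          (fun w t => pvHPush w (t.2.1, t.1, t.2.2)) waiting).Pairwise pvR :=
      pvFoldPush_sorted hsw _ _
    dsimp only
    split
    · -- A side: waiting' = []
      rename_i hnil
      rw [hnil] at hWperm hWsorted
      split
      · rw [hjump]
      · rename_i m hm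
        rw [hjump] at hm
        exact absurd (hWperm.symm.mem_iff.mp (PySem.List.min?_mem hm)) (List.not_mem_nil)
    · -- A side: waiting' = t :: wrest
      rename_i t wrest hcons
      rw [hcons] at hWperm hWsorted
      have htW : t ∈ wl ++ (heap.takeWhile (fun t => decide (t.1 ≤ pvJump heap waiting cur))).map
          (fun t => (t.2.1, t.1, t.2.2)) := hWperm.mem_iff.mp List.mem_cons_self
      split
      · rename_i hm
        rw [hjump] at hm
        exact absurd ((PySem.List.min?_eq_none_iff _ _).mp hm ▸ htW) List.not_mem_nil
      · rename_i m hm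
        rw [hjump] at hm ⊢
        have hmt : m = t := by
          have h1 : pvR m t := PySem.List.min?_isMin hm t htW
          have h2 : pvR t m := by
            have hmem : m ∈ t :: wrest := hWperm.mem_iff.mpr (PySem.List.min?_mem hm)
            rcases List.mem_cons.mp hmem with rfl | hmem'
            · exact le_refl _
            · exact (List.pairwise_cons.mp hWsorted).1 m hmem'
          exact pvR_antisymm h1 h2
        subst hmt
        rw [PySem.List.remove?_eq_some_erase _ _ htW, Option.getD_some]
        have herase : wrest.Perm ((wl ++ (heap.takeWhile
            (fun t => decide (t.1 ≤ pvJump heap waiting cur))).map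
            (fun t => (t.2.1, t.1, t.2.2))).erase m) := by
          have h2 := hWperm.erase m
          rwa [List.erase_cons_head] at h2
        have hlen1 := pvFoldPush_length (pvAdmit heap (pvJump heap waiting cur)).1
          (fun t => (t.2.1, t.1, t.2.2)) waiting
        rw [hcons] at hlen1
        have hadl := pvAdmit_length heap (pvJump heap waiting cur)
        rw [pvAdmit_eq]
        dsimp only
        refine ih ((heap.dropWhile (fun t => decide (t.1 ≤ pvJump heap waiting cur))).length
            + wrest.length) ?_ _ _ _ _ _ rfl ?_ ?_ herase
        · rw [pvAdmit_eq] at hadl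
          simp only [List.length_cons] at hlen1
          rw [pvAdmit_eq] at hlen1
          dsimp only at hadl hlen1
          omega
        · exact hsh.sublist (List.dropWhile_sublist _)
        · exact (List.pairwise_cons.mp hWsorted).2

theorem pvFold_eq_sorted (l : List pvT) :
    l.foldl pvHPush [] = PySem.List.sorted l pvKey := by
  refine List.eq_of_perm_of_sorted (le := pvR) ?_ ?_ ?_ ?_
  · intro a b _ _ h1 h2; exact pvR_antisymm h1 h2
  · have := pvFoldPush_sorted (w := []) List.Pairwise.nil l id
    simpa using this
  · exact PySem.List.sorted_pairwise l pvKey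
  · have h1 : (l.foldl pvHPush []).Perm l := by
      have := pvFoldPush_perm l id []
      simpa using this
    exact h1.trans (PySem.List.sorted_perm l pvKey false).symm

-- ===== VERDICT (by name: the statement is the Claim_ definition above) =====
theorem solution_spec : Claim_equal_solution := by
  intro program _ _
  unfold Spec_solution solution solution_alt
  have hinit : program.foldl
      (fun h r => pvHPush h (PySem.List.pyGetD r 1 0, PySem.List.pyGetD r 0 0, PySem.List.pyGetD r 2 0)) []
      = PySem.List.sorted
        (program.map (fun r => (PySem.List.pyGetD r 1 0, PySem.List.pyGetD r 0 0, PySem.List.pyGetD r 2 0)))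
        pvKey := by
    rw [← pvFold_eq_sorted, List.foldl_map]
  simp only [hinit]
  rw [pvLoop_eq ((PySem.List.sorted
        (program.map (fun r => (PySem.List.pyGetD r 1 0, PySem.List.pyGetD r 0 0, PySem.List.pyGetD r 2 0)))
        pvKey).length + 0) _ _ _ _ _ rfl ?_ List.Pairwise.nil (List.Perm.refl [])]
  · rw [← pvFold_eq_sorted, List.foldl_map]
    exact pvFoldPush_sorted List.Pairwise.nil _ _
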